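-- pv_equiv track=rewrite | github.com/RamananRavichandran/flames | src/driver/flames.py | r_pred
-- ===== SOURCE A (Python) =====
-- def r_pred(male,female):
--     if male == female:
--         relation = "both names are similiar..  I think you are in love with yourself ;)"
--         return relation
--     else:
--         word_count = len(male)+len(female)
--         for i in range(len(male)):
--             for j in range(len(female)):
--                 if male[i] == female[j]:
--                     word_count -= 1
--         if word_count % 6 == 1:
--             relation = "the best relationship that can work WELL between these two names is FRIENDSHIP"
--         elif word_count % 6 == 2:
--             relation = "the best relationship that can work WELL between these two names is LOVE"
--         elif word_count % 6 == 3: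
--             relation = "the best relationship that can work WELL between these two names is AFFECTION"
--         elif word_count % 6 == 4:
--             relation = "the best relationship that can work WELL between these two names is SPOUSE"
--         elif word_count % 6 == 5:
--             relation = "the best relationship that can work WELL between these two names is ENEMY"
--         elif word_count % 6 == 0:
--             relation = "the best relationship that can work WELL between these two names is SIBLINGS"
--         else:
--             relation = "Opps.......Not a valid input"
--     return relation
-- ===== SOURCE B (Python) =====
-- def r_pred(male, female):
--     if male == female:
--         return "both names are similiar..  I think you are in love with yourself ;)"
--     freq = {}
--     for c in female:
--         freq[c] = freq.get(c, 0) + 1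
--     word_count = len(male) + len(female)
--     for c in male:
--         word_count -= freq.get(c, 0)
--     phrases = ["SIBLINGS", "FRIENDSHIP", "LOVE", "AFFECTION", "SPOUSE", "ENEMY"]
--     return "the best relationship that can work WELL between these two names is " + phrases[word_count % 6]
-- ===== Notes on version B (the rewrite author's own statement) =====
-- stated objective: faster
-- what changed: Replaces the O(n*m) nested scan with a frequency dictionary of the female name built once (each male character subtracts its precomputed count), and replaces the elif chain with a table indexed by word_count % 6.
import Mathlib
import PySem

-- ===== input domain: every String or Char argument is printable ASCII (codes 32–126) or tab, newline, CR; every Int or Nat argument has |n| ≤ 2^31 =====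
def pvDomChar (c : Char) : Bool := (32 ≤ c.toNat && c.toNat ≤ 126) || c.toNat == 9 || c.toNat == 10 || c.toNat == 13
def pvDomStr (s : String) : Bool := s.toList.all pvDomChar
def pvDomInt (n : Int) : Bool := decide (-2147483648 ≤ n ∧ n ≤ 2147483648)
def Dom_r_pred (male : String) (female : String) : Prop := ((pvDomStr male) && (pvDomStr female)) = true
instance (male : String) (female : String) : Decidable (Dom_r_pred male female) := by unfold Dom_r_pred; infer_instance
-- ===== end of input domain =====

-- B replaces A's O(n*m) nested character scan by a frequency dictionary of the female
-- name built once, and the elif chain by a table indexed by word_count % 6 (objective: faster).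

-- ===== PORT A =====
def r_pred (male : String) (female : String) : String :=
  if male = female then
    "both names are similiar..  I think you are in love with yourself ;)"
  else
    let wc : Int :=
      (PySem.List.pyRange 0 (PySem.Str.len male)).foldl (fun wc i =>
        (PySem.List.pyRange 0 (PySem.Str.len female)).foldl (fun wc j =>
          -- male[i] / female[j]: i, j come from range(len(..)), always in range, so pyGetD is exact here
          if PySem.List.pyGetD male.toList i ' ' == PySem.List.pyGetD female.toList j ' '
          then wc - 1 else wc) wc)
        (PySem.Str.len male + PySem.Str.len female)
    if PySem.Int.mod wc 6 == 1 then "the best relationship that can work WELL between these two names is FRIENDSHIP"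
    else if PySem.Int.mod wc 6 == 2 then "the best relationship that can work WELL between these two names is LOVE"
    else if PySem.Int.mod wc 6 == 3 then "the best relationship that can work WELL between these two names is AFFECTION"
    else if PySem.Int.mod wc 6 == 4 then "the best relationship that can work WELL between these two names is SPOUSE"
    else if PySem.Int.mod wc 6 == 5 then "the best relationship that can work WELL between these two names is ENEMY"
    else if PySem.Int.mod wc 6 == 0 then "the best relationship that can work WELL between these two names is SIBLINGS"
    else "Opps.......Not a valid input"

-- ===== PORT B =====
def r_pred_alt (male : String) (female : String) : String :=
  if male = female then
    "both names are similiar..  I think you are in love with yourself ;)"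
  else
    let freq : PySem.Dict Char Int :=
      female.toList.foldl (fun d c => d.insert c (d.getD c 0 + 1)) PySem.Dict.empty
    let wc : Int :=
      male.toList.foldl (fun w c => w - freq.getD c 0)
        (PySem.Str.len male + PySem.Str.len female)
    let phrases : List String :=
      ["SIBLINGS", "FRIENDSHIP", "LOVE", "AFFECTION", "SPOUSE", "ENEMY"]
    -- phrases[word_count % 6]: 0 ≤ wc % 6 < 6, always in range, so pyGetD is exact here
    "the best relationship that can work WELL between these two names is " ++
      PySem.List.pyGetD phrases (PySem.Int.mod wc 6) ""

-- ===== PRECONDITION & SPEC =====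
def Spec_r_pred (male : String) (female : String) (out : String) : Prop := out = r_pred_alt male female
instance (male : String) (female : String) (out : String) : Decidable (Spec_r_pred male female out) := by unfold Spec_r_pred; infer_instance

-- ===== CLAIM (what is proved, stated in full; the proofs are below) =====
def Claim_equal_r_pred : Prop := ∀ (male : String) (female : String), Dom_r_pred male female → Spec_r_pred male female (r_pred male female)

-- ===== LEMMAS AND PROOFS =====

-- A's inner loop over female subtracts one per match: it subtracts count of mc.
theorem pv_inner_sub_count (mc : Char) (l : List Char) (w : Int) :
    l.foldl (fun w fc => if mc == fc then w - 1 else w) w = w - l.count mc := by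
  induction l generalizing w with
  | nil => simp
  | cons x xs ih =>
    simp only [List.foldl_cons, List.count_cons, ih]
    by_cases h : mc = x
    · simp [h]; omega
    · simp [h, Ne.symm h]

-- A's nested index loop and B's frequency-dictionary loop compute the same word count.
theorem pv_wc_full (male female : String) (init : Int) :
    (PySem.List.pyRange 0 (PySem.Str.len male)).foldl (fun wc i =>
        (PySem.List.pyRange 0 (PySem.Str.len female)).foldl (fun wc j =>
          if PySem.List.pyGetD male.toList i ' ' == PySem.List.pyGetD female.toList j ' '
          then wc - 1 else wc) wc) init
    = male.toList.foldl (fun w c =>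
        w - (female.toList.foldl (fun d c => d.insert c (d.getD c 0 + 1)) PySem.Dict.empty).getD c 0) init := by
  rw [PySem.Str.len_eq male, PySem.Str.len_eq female]
  rw [PySem.List.foldl_pyRange_zero_pyGetD' male.toList ' '
    (fun acc mc => (PySem.List.pyRange 0 (female.toList.length : Int)).foldl
      (fun wc j => if mc == PySem.List.pyGetD female.toList j ' ' then wc - 1 else wc) acc) init]
  apply PySem.List.foldl_congr_mem
  intro acc mc _
  rw [PySem.List.foldl_pyRange_zero_pyGetD' female.toList ' '
    (fun wc fc => if mc == fc then wc - 1 else wc) acc]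
  rw [pv_inner_sub_count, PySem.Dict.getD_foldl_insert_add_one]
  simp

theorem r_pred_eq (male female : String) : r_pred male female = r_pred_alt male female := by
  unfold r_pred r_pred_alt
  by_cases hmf : male = female
  · simp [hmf]
  · simp only [hmf, if_false]
    rw [pv_wc_full]
    generalize (male.toList.foldl (fun w c =>
        w - (female.toList.foldl (fun d c => d.insert c (d.getD c 0 + 1)) PySem.Dict.empty).getD c 0)
        (PySem.Str.len male + PySem.Str.len female)) = w
    have h0 : 0 ≤ PySem.Int.mod w 6 := PySem.Int.mod_nonneg w (by norm_num)
    have h1 : PySem.Int.mod w 6 < 6 := PySem.Int.mod_lt w (by norm_num)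
    generalize hr : PySem.Int.mod w 6 = r at h0 h1 ⊢
    interval_cases r <;> decide
-- ===== VERDICT (by name: the statement is the Claim_ definition above) =====
theorem r_pred_spec : Claim_equal_r_pred := by
  intro male female _
  unfold Spec_r_pred
  exact r_pred_eq male female
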